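-- pv_equiv track=rewrite | github.com/bayanist01/botToShow | bot/functions.py | erase_command
-- ===== SOURCE A (Python) =====
-- def erase_command(text, listofcommands):
--     """убирает самую левую команду из входящего сообщения"""
--     answer_ = text
--     low = answer_.lower()
--     startcom = len(low)
--     stopcom = startcom
--     for x in listofcommands:
--         if low.find(x) > -1:
--             if low.find(x) < startcom:
--                 startcom = low.find(x)
--                 stopcom = startcom + len(x)
--     answer_ = answer_[:startcom] + answer_[stopcom:]
--     return answer_
-- ===== SOURCE B (Python) =====
-- def erase_command(text, listofcommands):
--     """убирает самую левую команду из входящего сообщения"""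
--     low = text.lower()
--     for i in range(len(low)):
--         for cmd in listofcommands:
--             if low.startswith(cmd, i):
--                 return text[:i] + text[i + len(cmd):]
--     return text
-- ===== Notes on version B (the rewrite author's own statement) =====
-- stated objective: faster
-- what changed: B replaces A's per-command find-then-minimize fold (each command scanned independently over the whole text with str.find, keeping the minimum position) by a single left-to-right position scan checking low.startswith(cmd, i), returning at the first matching (position, command) pair — the loop nesting is reversed and the scan stops at the leftmost match.
import Mathlib
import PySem

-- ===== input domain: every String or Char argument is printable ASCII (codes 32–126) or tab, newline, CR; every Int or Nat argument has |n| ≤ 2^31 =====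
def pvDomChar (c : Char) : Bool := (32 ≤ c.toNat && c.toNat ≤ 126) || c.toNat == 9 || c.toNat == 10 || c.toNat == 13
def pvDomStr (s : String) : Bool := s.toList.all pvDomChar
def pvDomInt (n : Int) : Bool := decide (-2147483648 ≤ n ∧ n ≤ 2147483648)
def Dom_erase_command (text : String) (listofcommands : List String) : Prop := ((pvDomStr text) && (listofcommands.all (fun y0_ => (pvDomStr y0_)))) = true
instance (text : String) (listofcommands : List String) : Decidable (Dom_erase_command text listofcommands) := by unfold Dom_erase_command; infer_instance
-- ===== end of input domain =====

-- B replaces A's per-command find-then-minimize with a single left-to-right position scan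
-- that stops at the leftmost match (measured faster: A always scans the whole text per command).


-- ===== PORT A =====
def erase_command (text : String) (listofcommands : List String) : String :=
  let answer_ := text
  let low := PySem.Str.lower answer_
  let startcom : Int := PySem.Str.len low
  let stopcom : Int := startcom
  let st : Int × Int := listofcommands.foldl (fun (p : Int × Int) x =>
    if PySem.Str.find low x > -1 then
      if PySem.Str.find low x < p.1 then
        (PySem.Str.find low x, PySem.Str.find low x + PySem.Str.len x)
      else p
    else p) (startcom, stopcom)
  PySem.Str.slice answer_ none (some st.1) ++ PySem.Str.slice answer_ (some st.2) none

-- ===== PORT B =====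
-- inner loop of B: first command (in list order) matching at position i, with its length;
-- Python's low.startswith(cmd, i) for 0 ≤ i ≤ len(low) is exactly cmd.toList.isPrefixOf (low.drop i)
def pvFirstAt (low : List Char) (i : Nat) : List String → Option Nat
  | [] => none
  | c :: rest =>
    if c.toList.isPrefixOf (low.drop i) then some c.toList.length
    else pvFirstAt low i rest

-- outer loop of B: scan positions i upward; fuel = number of positions still to visit
def pvScanGo (text low : List Char) (cmds : List String) (i : Nat) : Nat → List Char
  | 0 => text
  | fuel + 1 =>
    match pvFirstAt low i cmds with
    | some L => text.take i ++ text.drop (i + L)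
    | none => pvScanGo text low cmds (i + 1) fuel

def erase_command_alt (text : String) (listofcommands : List String) : String :=
  let l := text.toList
  let low := PySem.Chars.lower l
  String.ofList (pvScanGo l low listofcommands 0 low.length)

-- ===== PRECONDITION & SPEC =====
def Spec_erase_command (text : String) (listofcommands : List String) (out : String) : Prop := out = erase_command_alt text listofcommands
instance (text : String) (listofcommands : List String) (out : String) : Decidable (Spec_erase_command text listofcommands out) := by unfold Spec_erase_command; infer_instance

-- ===== CLAIM (what is proved, stated in full; the proofs are below) =====
def Claim_equal_erase_command : Prop := ∀ (text : String) (listofcommands : List String), Dom_erase_command text listofcommands → Spec_erase_command text listofcommands (erase_command text listofcommands)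

-- ===== LEMMAS AND PROOFS =====

-- A's choice, computed from the right: the (position, stop) pair of the command A removes
-- (leftmost find, earliest command on ties), or none if no command occurs in low.
def pvMinFind (low : List Char) : List String → Option (Int × Int)
  | [] => none
  | c :: cs =>
    if PySem.Chars.find low c.toList = -1 then pvMinFind low cs
    else match pvMinFind low cs with
      | none => some (PySem.Chars.find low c.toList, PySem.Chars.find low c.toList + c.toList.length)
      | some (p, q) =>
        if PySem.Chars.find low c.toList ≤ p then
          some (PySem.Chars.find low c.toList, PySem.Chars.find low c.toList + c.toList.length)
        else some (p, q)

-- A's fold over the command list computes exactly pvMinFind, thresholded by the initial state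
lemma foldA_char (low : List Char) (cs : List String) (s t : Int) :
    cs.foldl (fun (p : Int × Int) x =>
      if PySem.Chars.find low x.toList > -1 then
        if PySem.Chars.find low x.toList < p.1 then
          (PySem.Chars.find low x.toList, PySem.Chars.find low x.toList + (x.toList.length : Int))
        else p
      else p) (s, t)
    = match pvMinFind low cs with
      | none => (s, t)
      | some (p, q) => if p < s then (p, q) else (s, t) := by
  induction cs generalizing s t with
  | nil => rfl
  | cons c cs ih =>
    by_cases hc : PySem.Chars.find low c.toList = -1
    · have hng : ¬ PySem.Chars.find low c.toList > -1 := by omega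
      rw [List.foldl_cons, if_neg hng, ih, pvMinFind, if_pos hc]
    · have hpos : PySem.Chars.find low c.toList > -1 := by
        have := PySem.Chars.neg_one_le_find low c.toList
        omega
      rw [List.foldl_cons, if_pos hpos]
      by_cases hlt : PySem.Chars.find low c.toList < s
      · rw [if_pos hlt, ih, pvMinFind, if_neg hc]
        cases hr : pvMinFind low cs with
        | none => simp [hlt]
        | some pq =>
          obtain ⟨p, q⟩ := pq
          by_cases hle : PySem.Chars.find low c.toList ≤ p
          · have h1 : ¬ p < PySem.Chars.find low c.toList := by omega
            simp [hle, h1, hlt]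
          · have h1 : p < PySem.Chars.find low c.toList := by omega
            have h2 : p < s := by omega
            simp [hle, h1, h2]
      · rw [if_neg hlt, ih, pvMinFind, if_neg hc]
        cases hr : pvMinFind low cs with
        | none => simp [hlt]
        | some pq =>
          obtain ⟨p, q⟩ := pq
          by_cases hle : PySem.Chars.find low c.toList ≤ p
          · have h1 : ¬ p < s := by omega
            simp [hle, hlt, h1]
          · simp [hle]

-- if pvMinFind finds nothing, no command matches anywhere
lemma pvMinFind_none (low : List Char) (cs : List String) (h : pvMinFind low cs = none) :
    ∀ j, pvFirstAt low j cs = none := by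
  induction cs with
  | nil => intro j; rfl
  | cons c cs ih =>
    intro j
    simp only [pvMinFind] at h
    by_cases hc : PySem.Chars.find low c.toList = -1
    · simp only [hc, if_pos] at h
      have hninf : ¬ c.toList <:+: low := (PySem.Chars.find_eq_neg_one_iff low c.toList).mp hc
      have hnp : ¬ c.toList.isPrefixOf (low.drop j) := by
        intro hp
        exact absurd ((PySem.Chars.exists_prefix_drop_iff_isIn c.toList low).mp
          ⟨j, List.isPrefixOf_iff_prefix.mp hp⟩)
          (by simpa [PySem.Chars.isIn_eq_false_iff] using hninf)
      simp [pvFirstAt, hnp, ih h j]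
    · exfalso
      simp only [hc, ite_false] at h
      cases hr : pvMinFind low cs <;> simp [hr] at h
      split at h <;> simp_all

-- if pvMinFind = some (p, q): p is a Nat position, q = p + length of the first command
-- matching at p, pvFirstAt at p returns exactly that length, and no position below p matches
lemma pvMinFind_some (low : List Char) (cs : List String) (p q : Int)
    (h : pvMinFind low cs = some (p, q)) :
    0 ≤ p ∧ p ≤ (low.length : Int) ∧
    pvFirstAt low p.toNat cs = some (q - p).toNat ∧ q = p + (q - p).toNat ∧
    ∀ j < p.toNat, pvFirstAt low j cs = none := by
  induction cs generalizing p q with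
  | nil => simp [pvMinFind] at h
  | cons c cs ih =>
    simp only [pvMinFind] at h
    by_cases hc : PySem.Chars.find low c.toList = -1
    · simp only [hc, if_pos] at h
      obtain ⟨h0, h1, h2, h3, h4⟩ := ih p q h
      have hninf : ¬ c.toList <:+: low := (PySem.Chars.find_eq_neg_one_iff low c.toList).mp hc
      have hnp : ∀ j, ¬ c.toList.isPrefixOf (low.drop j) := by
        intro j hp
        exact absurd ((PySem.Chars.exists_prefix_drop_iff_isIn c.toList low).mp
          ⟨j, List.isPrefixOf_iff_prefix.mp hp⟩)
          (by simpa [PySem.Chars.isIn_eq_false_iff] using hninf)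
      refine ⟨h0, h1, ?_, h3, ?_⟩
      · simp [pvFirstAt, hnp, h2]
      · intro j hj; simp [pvFirstAt, hnp, h4 j hj]
    · -- c occurs; let f be its first position
      have hf0 : 0 ≤ PySem.Chars.find low c.toList := by
        have := PySem.Chars.neg_one_le_find low c.toList
        omega
      obtain ⟨hpre, hmin⟩ := PySem.Chars.find_spec hf0
      have hfle : PySem.Chars.find low c.toList ≤ (low.length : Int) :=
        PySem.Chars.find_le_length low c.toList
      simp only [hc, ite_false] at h
      cases hr : pvMinFind low cs with
      | none =>
        rw [hr] at h
        simp only [Option.some.injEq, Prod.mk.injEq] at h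
        obtain ⟨hp, hq⟩ := h
        have hall := pvMinFind_none low cs hr
        subst hp
        refine ⟨hf0, hfle, ?_, ?_, ?_⟩
        · have : (q - PySem.Chars.find low c.toList).toNat = c.toList.length := by omega
          simp [pvFirstAt, List.isPrefixOf_iff_prefix.mpr hpre, this]
        · omega
        · intro j hj
          have : ¬ c.toList.isPrefixOf (low.drop j) := by
            intro hp
            exact hmin j (by omega) (List.isPrefixOf_iff_prefix.mp hp)
          simp [pvFirstAt, this, hall j]
      | some pq =>
        obtain ⟨p', q'⟩ := pq
        rw [hr] at h
        obtain ⟨h0, h1, h2, h3, h4⟩ := ih p' q' hr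
        by_cases hle : PySem.Chars.find low c.toList ≤ p'
        · simp only [if_pos hle, Option.some.injEq, Prod.mk.injEq] at h
          obtain ⟨hp, hq⟩ := h
          subst hp
          refine ⟨hf0, hfle, ?_, ?_, ?_⟩
          · have : (q - PySem.Chars.find low c.toList).toNat = c.toList.length := by omega
            simp [pvFirstAt, List.isPrefixOf_iff_prefix.mpr hpre, this]
          · omega
          · intro j hj
            have hnc : ¬ c.toList.isPrefixOf (low.drop j) := by
              intro hp
              exact hmin j (by omega) (List.isPrefixOf_iff_prefix.mp hp)
            have : j < p'.toNat := by omega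
            simp [pvFirstAt, hnc, h4 j this]
        · simp only [if_neg hle, Option.some.injEq, Prod.mk.injEq] at h
          obtain ⟨hp, hq⟩ := h
          subst hp; subst hq
          have hplt : p' < PySem.Chars.find low c.toList := by omega
          have hnc : ¬ c.toList.isPrefixOf (low.drop p'.toNat) := by
            intro hpp
            exact hmin p'.toNat (by omega) (List.isPrefixOf_iff_prefix.mp hpp)
          refine ⟨h0, h1, ?_, h3, ?_⟩
          · simp [pvFirstAt, hnc, h2]
          · intro j hj
            have hncj : ¬ c.toList.isPrefixOf (low.drop j) := by
              intro hpp
              exact hmin j (by omega) (List.isPrefixOf_iff_prefix.mp hpp)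
            simp [pvFirstAt, hncj, h4 j hj]

-- B's scan computes the pvMinFind-determined splice
lemma scan_char (text low : List Char) (cs : List String) :
    ∀ (fuel i : Nat), i + fuel = low.length →
    (∀ j < i, pvFirstAt low j cs = none) →
    pvScanGo text low cs i fuel =
      match pvMinFind low cs with
      | none => text
      | some (p, q) => if p.toNat < low.length then text.take p.toNat ++ text.drop q.toNat else text := by
  intro fuel
  induction fuel with
  | zero =>
    intro i hi hnone
    cases hm : pvMinFind low cs with
    | none => rfl
    | some pq =>
      obtain ⟨p, q⟩ := pq
      obtain ⟨h0, h1, h2, h3, h4⟩ := pvMinFind_some low cs p q hm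
      simp only [pvScanGo]
      by_cases hlt : p.toNat < low.length
      · exact absurd h2 (by simp [hnone p.toNat (by omega)])
      · simp [hlt]
  | succ fuel ih =>
    intro i hi hnone
    simp only [pvScanGo]
    cases hfa : pvFirstAt low i cs with
    | some L =>
      cases hm : pvMinFind low cs with
      | none => exact absurd hfa (by simp [pvMinFind_none low cs hm i])
      | some pq =>
        obtain ⟨p, q⟩ := pq
        obtain ⟨h0, h1, h2, h3, h4⟩ := pvMinFind_some low cs p q hm
        have hpi : p.toNat = i := by
          rcases Nat.lt_trichotomy p.toNat i with h | h | h
          · exact absurd h2 (by simp [hnone p.toNat h])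
          · exact h
          · exact absurd hfa (by simp [h4 i h])
        rw [hpi] at h2
        rw [hfa] at h2
        have hL : L = (q - p).toNat := by simpa using h2
        have hq : q.toNat = i + L := by omega
        have hilt : i < low.length := by omega
        simp [hpi, hq, hilt]
    | none =>
      have := ih (i + 1) (by omega) (by
        intro j hj
        rcases Nat.lt_succ_iff_lt_or_eq.mp hj with h | h
        · exact hnone j h
        · subst h; exact hfa)
      simpa using this

-- ===== VERDICT (by name: the statement is the Claim_ definition above) =====
theorem erase_command_spec : Claim_equal_erase_command := by
  intro text cmds _
  unfold Spec_erase_command erase_command erase_command_alt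
  apply String.toList_inj.mp
  simp only [String.toList_append, PySem.Str.toList_lower, PySem.Str.toList_slice,
    PySem.Str.len_eq, PySem.Str.find_eq, PySem.Str.toList_lower, String.toList_ofList,
    PySem.Chars.slice_eq_listSlice]
  set l := text.toList with hl
  set low := PySem.Chars.lower l with hlow
  have hlen : low.length = l.length := by simp [hlow, PySem.Chars.lower]
  rw [foldA_char low cmds (low.length : Int) (low.length : Int)]
  rw [scan_char l low cmds low.length 0 (by omega) (by omega)]
  cases hm : pvMinFind low cmds with
  | none =>
    simp [PySem.List.slice_to_natCast, PySem.List.slice_from_natCast, hlen]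
  | some pq =>
    obtain ⟨p, q⟩ := pq
    obtain ⟨h0, h1, h2, h3, h4⟩ := pvMinFind_some low cmds p q hm
    by_cases hp : p < (low.length : Int)
    · have hplt : p.toNat < low.length := by omega
      have hq0 : 0 ≤ q := by omega
      simp only [if_pos hp, if_pos hplt]
      rw [PySem.List.slice_to l h0, PySem.List.slice_from l hq0]
    · have : ¬ p.toNat < low.length := by omega
      simp only [if_neg hp, if_neg this]
      simp [PySem.List.slice_to_natCast, PySem.List.slice_from_natCast, hlen]
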